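-- pv_equiv track=rewrite | github.com/GEM-Jay/Pano_Expression | I2T.py | parse_residual_text
-- ===== SOURCE A (Python) =====
-- def parse_residual_text(raw: str):
--     """
--     从模型输出里解析出两个 list：
--
--     [semantic_residual]
--     a, b, c
--
--     [texture_residual]
--     x, y, z
--     """
--     semantic, texture = [], []
--     current = None
--
--     for line in raw.splitlines():
--         line = line.strip()
--         if not line:
--             continue
--
--         low = line.lower()
--         if low.startswith("[semantic_residual]"):
--             current = "sem"
--             continue
--         if low.startswith("[texture_residual]"):
--             current = "tex"
--             continue
--
--         tokens = [t.strip() for t in line.split(",") if t.strip()]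
--         if current == "sem":
--             semantic.extend(tokens)
--         elif current == "tex":
--             texture.extend(tokens)
--
--     return semantic, texture
-- ===== SOURCE B (Python) =====
-- def parse_residual_text(raw: str):
--     def section_of(line):
--         low = line.lower()
--         if low.startswith("[semantic_residual]"):
--             return "sem"
--         if low.startswith("[texture_residual]"):
--             return "tex"
--         return None
--
--     lines = raw.splitlines()
--     n = len(lines)
--     semantic, texture = [], []
--     i = 0
--     while i < n:
--         sec = section_of(lines[i].strip())
--         i += 1
--         if sec is None:
--             continue
--         # consume the whole block belonging to this header
--         tokens = []
--         while i < n: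
--             line = lines[i].strip()
--             if section_of(line) is not None:
--                 break
--             tokens.extend(t.strip() for t in line.split(",") if t.strip())
--             i += 1
--         (semantic if sec == "sem" else texture).extend(tokens)
--     return semantic, texture
-- ===== Notes on version B (the rewrite author's own statement) =====
-- stated objective: alternative
-- what changed: A is a flat one-pass state machine that carries a 'current' section flag across every line; B first finds a header, then consumes that header's whole block of lines in an inner loop (nested-loop block decomposition), extending the matching list once per block.
import Mathlib
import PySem

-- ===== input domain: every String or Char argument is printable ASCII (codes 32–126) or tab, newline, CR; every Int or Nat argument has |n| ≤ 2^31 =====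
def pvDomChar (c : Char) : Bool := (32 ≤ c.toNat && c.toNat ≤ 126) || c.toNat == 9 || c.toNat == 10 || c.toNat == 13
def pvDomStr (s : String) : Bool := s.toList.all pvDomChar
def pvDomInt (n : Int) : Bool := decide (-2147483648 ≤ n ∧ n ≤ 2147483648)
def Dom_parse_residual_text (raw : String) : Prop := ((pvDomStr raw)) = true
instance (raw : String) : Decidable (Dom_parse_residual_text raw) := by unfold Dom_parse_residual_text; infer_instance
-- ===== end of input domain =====

-- B replaces A's flat one-pass state machine (a 'current' flag updated per line) by a
-- nested-loop block decomposition (outer loop finds a header, inner loop consumes its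
-- whole block); objective: alternative structure, same cost; return values proved equal.

-- ===== PORT A =====
-- tokens of one stripped line: [t.strip() for t in line.split(",") if t.strip()]
def pvTokensA (line : String) : List String :=
  (((PySem.Str.split? line ",").getD []).map PySem.Str.strip).filter (fun t => t ≠ "")

-- one step of A's for-loop over raw.splitlines(); state = (semantic, texture, current)
def pvStepA (st : List String × List String × Option String) (line : String) :
    List String × List String × Option String :=
  if PySem.Str.strip line = "" then st
  else if PySem.Str.startswith (PySem.Str.lower (PySem.Str.strip line))
      "[semantic_residual]" then (st.1, st.2.1, some "sem")
  else if PySem.Str.startswith (PySem.Str.lower (PySem.Str.strip line))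
      "[texture_residual]" then (st.1, st.2.1, some "tex")
  else if st.2.2 == some "sem" then (st.1 ++ pvTokensA (PySem.Str.strip line), st.2.1, st.2.2)
  else if st.2.2 == some "tex" then (st.1, st.2.1 ++ pvTokensA (PySem.Str.strip line), st.2.2)
  else st

def parse_residual_text (raw : String) : List String × List String :=
  let st := (PySem.Str.splitlines raw).foldl pvStepA ([], [], none)
  (st.1, st.2.1)

-- ===== PORT B =====
-- B's helper section_of
def pvSectionOf (line : String) : Option String :=
  if PySem.Str.startswith (PySem.Str.lower line) "[semantic_residual]" then some "sem"
  else if PySem.Str.startswith (PySem.Str.lower line) "[texture_residual]" then some "tex"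
  else none

-- tokens contributed by one (already stripped) line of a block
def pvLineTokens (line : String) : List String :=
  (((PySem.Str.split? line ",").getD []).map PySem.Str.strip).filter (fun t => t ≠ "")

-- B's inner while loop: consume non-header lines, accumulating their tokens
def pvTakeBlock (lines : List String) (tokens : List String) : List String × List String :=
  match lines with
  | [] => (tokens, [])
  | line :: rest =>
    if (pvSectionOf (PySem.Str.strip line)).isSome then (tokens, line :: rest)
    else pvTakeBlock rest (tokens ++ pvLineTokens (PySem.Str.strip line))

-- B's outer while loop: 'while i < n', rendered structurally with fuel = n - i
-- (the remaining-line count); the wrapper supplies fuel = len(lines), which always suffices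
def pvParseLoopF : Nat → List String → List String → List String → List String × List String
  | 0, _, semantic, texture => (semantic, texture)
  | _ + 1, [], semantic, texture => (semantic, texture)
  | fuel + 1, line :: rest, semantic, texture =>
    if pvSectionOf (PySem.Str.strip line) = none then pvParseLoopF fuel rest semantic texture
    else
      let tb := pvTakeBlock rest []
      if pvSectionOf (PySem.Str.strip line) = some "sem" then
        pvParseLoopF fuel tb.2 (semantic ++ tb.1) texture
      else pvParseLoopF fuel tb.2 semantic (texture ++ tb.1)

def pvParseLoop (lines : List String) (semantic texture : List String) :
    List String × List String :=
  pvParseLoopF lines.length lines semantic texture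

def parse_residual_text_alt (raw : String) : List String × List String :=
  pvParseLoop (PySem.Str.splitlines raw) [] []

-- ===== PRECONDITION & SPEC =====
def Spec_parse_residual_text (raw : String) (out : List String × List String) : Prop := out = parse_residual_text_alt raw
instance (raw : String) (out : List String × List String) : Decidable (Spec_parse_residual_text raw out) := by unfold Spec_parse_residual_text; infer_instance

-- ===== CLAIM (what is proved, stated in full; the proofs are below) =====
def Claim_equal_parse_residual_text : Prop := ∀ (raw : String), Dom_parse_residual_text raw → Spec_parse_residual_text raw (parse_residual_text raw)

-- ===== LEMMAS AND PROOFS =====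

theorem pvSectionOf_empty : pvSectionOf "" = none := by decide

theorem pvLineTokens_empty : pvLineTokens "" = [] := by decide

theorem pvTakeBlock_len (lines tokens : List String) :
    (pvTakeBlock lines tokens).2.length ≤ lines.length := by
  induction lines generalizing tokens with
  | nil => simp [pvTakeBlock]
  | cons l rest ih =>
    simp only [pvTakeBlock]
    split
    · simp
    · exact le_trans (ih _) (Nat.le_succ _)

-- the result of pvParseLoopF does not depend on the fuel, as long as it suffices
theorem pvParseLoopF_irrel (f1 : Nat) : ∀ (f2 : Nat) (lines s t : List String),
    lines.length ≤ f1 → lines.length ≤ f2 →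
    pvParseLoopF f1 lines s t = pvParseLoopF f2 lines s t := by
  induction f1 with
  | zero =>
    intro f2 lines s t h1 _
    have hnil : lines = [] := List.eq_nil_of_length_eq_zero (Nat.le_zero.mp h1)
    subst hnil
    cases f2 <;> rfl
  | succ g ih =>
    intro f2 lines s t h1 h2
    cases lines with
    | nil => cases f2 <;> rfl
    | cons line rest =>
      cases f2 with
      | zero => exact absurd h2 (by simp)
      | succ h =>
        have hr1 : rest.length ≤ g := by simpa using h1
        have hr2 : rest.length ≤ h := by simpa using h2
        have hb1 : (pvTakeBlock rest []).2.length ≤ g :=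
          le_trans (pvTakeBlock_len rest []) hr1
        have hb2 : (pvTakeBlock rest []).2.length ≤ h :=
          le_trans (pvTakeBlock_len rest []) hr2
        simp only [pvParseLoopF]
        by_cases hn : pvSectionOf (PySem.Str.strip line) = none
        · rw [if_pos hn, if_pos hn]
          exact ih h rest s t hr1 hr2
        · rw [if_neg hn, if_neg hn]
          by_cases hm : pvSectionOf (PySem.Str.strip line) = some "sem"
          · rw [if_pos hm, if_pos hm]
            exact ih h _ _ _ hb1 hb2
          · rw [if_neg hm, if_neg hm]
            exact ih h _ _ _ hb1 hb2

theorem pvParseLoop_nil (s t : List String) : pvParseLoop [] s t = (s, t) := rfl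

theorem pvParseLoop_cons_none {line : String} (rest : List String) (s t : List String)
    (h : pvSectionOf (PySem.Str.strip line) = none) :
    pvParseLoop (line :: rest) s t = pvParseLoop rest s t := by
  simp only [pvParseLoop, List.length_cons, pvParseLoopF]
  rw [if_pos h]

theorem pvParseLoop_cons_sem {line : String} (rest : List String) (s t : List String)
    (h : pvSectionOf (PySem.Str.strip line) = some "sem") :
    pvParseLoop (line :: rest) s t
      = pvParseLoop (pvTakeBlock rest []).2 (s ++ (pvTakeBlock rest []).1) t := by
  simp only [pvParseLoop, List.length_cons, pvParseLoopF]
  rw [if_neg (by rw [h]; decide), if_pos h]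
  exact pvParseLoopF_irrel rest.length _ _ _ _ (pvTakeBlock_len rest []) le_rfl

theorem pvParseLoop_cons_tex {line : String} (rest : List String) (s t : List String)
    (h : pvSectionOf (PySem.Str.strip line) = some "tex") :
    pvParseLoop (line :: rest) s t
      = pvParseLoop (pvTakeBlock rest []).2 s (t ++ (pvTakeBlock rest []).1) := by
  simp only [pvParseLoop, List.length_cons, pvParseLoopF]
  rw [if_neg (by rw [h]; decide), if_neg (by rw [h]; decide)]
  exact pvParseLoopF_irrel rest.length _ _ _ _ (pvTakeBlock_len rest []) le_rfl

theorem pvTakeBlock_cons_header {line : String} (rest acc : List String)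
    (h : (pvSectionOf (PySem.Str.strip line)).isSome) :
    pvTakeBlock (line :: rest) acc = (acc, line :: rest) := by
  simp [pvTakeBlock, h]

theorem pvTakeBlock_cons_body {line : String} (rest acc : List String)
    (h : pvSectionOf (PySem.Str.strip line) = none) :
    pvTakeBlock (line :: rest) acc
      = pvTakeBlock rest (acc ++ pvLineTokens (PySem.Str.strip line)) := by
  simp [pvTakeBlock, h]

theorem pvTakeBlock_acc (lines tokens : List String) :
    pvTakeBlock lines tokens
      = (tokens ++ (pvTakeBlock lines []).1, (pvTakeBlock lines []).2) := by
  induction lines generalizing tokens with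
  | nil => simp [pvTakeBlock]
  | cons l rest ih =>
    cases hc : pvSectionOf (PySem.Str.strip l) with
    | some s =>
      rw [pvTakeBlock_cons_header rest tokens (by rw [hc]; rfl),
          pvTakeBlock_cons_header rest [] (by rw [hc]; rfl)]
      simp
    | none =>
      rw [pvTakeBlock_cons_body rest tokens hc, pvTakeBlock_cons_body rest [] hc,
          List.nil_append, ih (tokens ++ pvLineTokens (PySem.Str.strip l)),
          ih (pvLineTokens (PySem.Str.strip l))]
      simp

-- the simultaneous invariant relating A's state machine to B's block decomposition
theorem pvMain (lines : List String) : ∀ sem tex : List String,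
    ((lines.foldl pvStepA (sem, tex, none)).1, (lines.foldl pvStepA (sem, tex, none)).2.1)
        = pvParseLoop lines sem tex
  ∧ ((lines.foldl pvStepA (sem, tex, some "sem")).1,
        (lines.foldl pvStepA (sem, tex, some "sem")).2.1)
        = pvParseLoop (pvTakeBlock lines []).2 (sem ++ (pvTakeBlock lines []).1) tex
  ∧ ((lines.foldl pvStepA (sem, tex, some "tex")).1,
        (lines.foldl pvStepA (sem, tex, some "tex")).2.1)
        = pvParseLoop (pvTakeBlock lines []).2 sem (tex ++ (pvTakeBlock lines []).1) := by
  induction lines with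
  | nil =>
    intro sem tex
    refine ⟨by simp [pvParseLoop_nil], ?_, ?_⟩ <;>
      simp [pvTakeBlock, pvParseLoop_nil]
  | cons line rest ih =>
    intro sem tex
    by_cases he : PySem.Str.strip line = ""
    · have hsec : pvSectionOf (PySem.Str.strip line) = none := by
        rw [he]; exact pvSectionOf_empty
      have hstep : ∀ cur, pvStepA (sem, tex, cur) line = (sem, tex, cur) := by
        intro cur; simp only [pvStepA]; rw [if_pos he]
      refine ⟨?_, ?_, ?_⟩
      · rw [List.foldl_cons, hstep, pvParseLoop_cons_none rest sem tex hsec]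
        exact (ih sem tex).1
      · rw [List.foldl_cons, hstep, pvTakeBlock_cons_body rest [] hsec, he,
          pvLineTokens_empty, List.append_nil]
        exact (ih sem tex).2.1
      · rw [List.foldl_cons, hstep, pvTakeBlock_cons_body rest [] hsec, he,
          pvLineTokens_empty, List.append_nil]
        exact (ih sem tex).2.2
    · by_cases hs : PySem.Str.startswith (PySem.Str.lower (PySem.Str.strip line))
          "[semantic_residual]" = true
      · have hsec : pvSectionOf (PySem.Str.strip line) = some "sem" := by
          simp only [pvSectionOf]; rw [if_pos hs]
        have hstep : ∀ cur, pvStepA (sem, tex, cur) line = (sem, tex, some "sem") := by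
          intro cur; simp only [pvStepA]; rw [if_neg he, if_pos hs]
        refine ⟨?_, ?_, ?_⟩
        · rw [List.foldl_cons, hstep, pvParseLoop_cons_sem rest sem tex hsec]
          exact (ih sem tex).2.1
        · rw [List.foldl_cons, hstep, pvTakeBlock_cons_header rest [] (by rw [hsec]; rfl),
            pvParseLoop_cons_sem rest (sem ++ []) tex hsec, List.append_nil]
          exact (ih sem tex).2.1
        · rw [List.foldl_cons, hstep, pvTakeBlock_cons_header rest [] (by rw [hsec]; rfl),
            pvParseLoop_cons_sem rest sem (tex ++ []) hsec, List.append_nil]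
          exact (ih sem tex).2.1
      · by_cases ht : PySem.Str.startswith (PySem.Str.lower (PySem.Str.strip line))
            "[texture_residual]" = true
        · have hsec : pvSectionOf (PySem.Str.strip line) = some "tex" := by
            simp only [pvSectionOf]; rw [if_neg hs, if_pos ht]
          have hstep : ∀ cur, pvStepA (sem, tex, cur) line = (sem, tex, some "tex") := by
            intro cur; simp only [pvStepA]; rw [if_neg he, if_neg hs, if_pos ht]
          refine ⟨?_, ?_, ?_⟩
          · rw [List.foldl_cons, hstep, pvParseLoop_cons_tex rest sem tex hsec]
            exact (ih sem tex).2.2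
          · rw [List.foldl_cons, hstep, pvTakeBlock_cons_header rest [] (by rw [hsec]; rfl),
              pvParseLoop_cons_tex rest (sem ++ []) tex hsec, List.append_nil]
            exact (ih sem tex).2.2
          · rw [List.foldl_cons, hstep, pvTakeBlock_cons_header rest [] (by rw [hsec]; rfl),
              pvParseLoop_cons_tex rest sem (tex ++ []) hsec, List.append_nil]
            exact (ih sem tex).2.2
        · have hsec : pvSectionOf (PySem.Str.strip line) = none := by
            simp only [pvSectionOf]; rw [if_neg hs, if_neg ht]
          have hstep0 : pvStepA (sem, tex, none) line = (sem, tex, none) := by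
            simp only [pvStepA]; rw [if_neg he, if_neg hs, if_neg ht]; rfl
          have hstepS : pvStepA (sem, tex, some "sem") line
              = (sem ++ pvTokensA (PySem.Str.strip line), tex, some "sem") := by
            simp only [pvStepA]; rw [if_neg he, if_neg hs, if_neg ht]
            rfl
          have hstepT : pvStepA (sem, tex, some "tex") line
              = (sem, tex ++ pvTokensA (PySem.Str.strip line), some "tex") := by
            simp only [pvStepA]; rw [if_neg he, if_neg hs, if_neg ht]
            rfl
          have htok : pvTokensA (PySem.Str.strip line) = pvLineTokens (PySem.Str.strip line) := rfl
          refine ⟨?_, ?_, ?_⟩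
          · rw [List.foldl_cons, hstep0, pvParseLoop_cons_none rest sem tex hsec]
            exact (ih sem tex).1
          · rw [List.foldl_cons, hstepS, pvTakeBlock_cons_body rest [] hsec,
              List.nil_append, pvTakeBlock_acc rest (pvLineTokens (PySem.Str.strip line)), htok]
            have := (ih (sem ++ pvLineTokens (PySem.Str.strip line)) tex).2.1
            simpa [List.append_assoc] using this
          · rw [List.foldl_cons, hstepT, pvTakeBlock_cons_body rest [] hsec,
              List.nil_append, pvTakeBlock_acc rest (pvLineTokens (PySem.Str.strip line)), htok]
            have := (ih sem (tex ++ pvLineTokens (PySem.Str.strip line))).2.2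
            simpa [List.append_assoc] using this

-- ===== VERDICT (by name: the statement is the Claim_ definition above) =====
theorem parse_residual_text_spec : Claim_equal_parse_residual_text := by
  intro raw _
  unfold Spec_parse_residual_text parse_residual_text parse_residual_text_alt
  exact (pvMain (PySem.Str.splitlines raw) [] []).1
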